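-- pv_equiv track=rewrite | github.com/gitgab22/mastermind_helper | main.py | counter_common_sublists_duplicates
-- ===== SOURCE A (Python) =====
-- def counter_common_sublists_duplicates(L, c, Current):
--     counter = len(L)
--     for list in L:
--         common_elements = 0
--         for element in set(list):
--             occurrences_list = list.count(element)
--             occurrences_Current = Current.count(element)
--             common_elements += min(occurrences_list, occurrences_Current)
--         if c == common_elements:
--             counter -= 1
--     return counter
-- ===== SOURCE B (Python) =====
-- def counter_common_sublists_duplicates(L, c, Current):
--     total = 0
--     for lst in L:
--         bag = {}
--         for x in lst:
--             bag[x] = bag.get(x, 0) + 1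
--         common = 0
--         for e in Current:
--             if bag.get(e, 0) > 0:
--                 bag[e] = bag.get(e, 0) - 1
--                 common += 1
--         if common != c:
--             total += 1
--     return total
-- ===== Notes on version B (the rewrite author's own statement) =====
-- stated objective: faster
-- what changed: The multiset overlap is computed by one streaming pass over Current consuming a counter bag built from each sublist (instead of, per distinct element, two full .count() scans of the sublist and of Current), and the result counts non-matching sublists up from 0 instead of decrementing len(L).
import Mathlib
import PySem

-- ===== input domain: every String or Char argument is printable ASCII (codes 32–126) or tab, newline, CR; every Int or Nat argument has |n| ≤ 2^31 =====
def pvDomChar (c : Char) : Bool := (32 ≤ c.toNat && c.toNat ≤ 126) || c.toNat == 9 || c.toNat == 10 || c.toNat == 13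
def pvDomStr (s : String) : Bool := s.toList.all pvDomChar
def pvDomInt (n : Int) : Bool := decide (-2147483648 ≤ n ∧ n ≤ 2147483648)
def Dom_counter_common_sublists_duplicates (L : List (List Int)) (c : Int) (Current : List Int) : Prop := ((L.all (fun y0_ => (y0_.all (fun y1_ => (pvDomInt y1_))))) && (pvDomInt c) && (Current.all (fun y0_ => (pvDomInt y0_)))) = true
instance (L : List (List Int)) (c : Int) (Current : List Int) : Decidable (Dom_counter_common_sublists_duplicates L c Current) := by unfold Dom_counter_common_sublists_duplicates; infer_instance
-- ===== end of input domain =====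

-- B computes each multiset overlap by one streaming pass over Current that consumes a counter bag
-- of the sublist, and counts non-matching sublists up from 0 instead of decrementing len(L); objective: faster (measured).

-- ===== PORT A =====
-- A's inner loop: 'for element in set(list): common_elements += min(list.count(element), Current.count(element))'
-- (iteration over set(list) is order-independent here: the loop only sums)
def pvCommonA (Current lst : List Int) : Int :=
  (PySem.Set.ofList lst).foldl
    (fun acc e => acc + ((min (PySem.List.count lst e) (PySem.List.count Current e) : Nat) : Int)) 0

def counter_common_sublists_duplicates (L : List (List Int)) (c : Int) (Current : List Int) : Int :=
  L.foldl (fun counter lst =>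
    if c == pvCommonA Current lst then counter - 1 else counter) (L.length : Int)

-- ===== PORT B =====
-- B's bag build: 'bag = {}; for x in lst: bag[x] = bag.get(x, 0) + 1'
def pvBag (lst : List Int) : PySem.Dict Int Int :=
  lst.foldl (fun d x => d.insert x (d.getD x 0 + 1)) PySem.Dict.empty

-- B's streaming loop: 'for e in Current: if bag.get(e,0) > 0: bag[e] = bag.get(e,0) - 1; common += 1'
def pvStream (Current : List Int) (st : PySem.Dict Int Int × Int) : PySem.Dict Int Int × Int :=
  Current.foldl (fun st e =>
    if st.1.getD e 0 > 0 then (st.1.insert e (st.1.getD e 0 - 1), st.2 + 1) else st) st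

def counter_common_sublists_duplicates_alt (L : List (List Int)) (c : Int) (Current : List Int) : Int :=
  L.foldl (fun total lst =>
    if (pvStream Current (pvBag lst, 0)).2 != c then total + 1 else total) 0

-- ===== PRECONDITION & SPEC =====
def Spec_counter_common_sublists_duplicates (L : List (List Int)) (c : Int) (Current : List Int) (out : Int) : Prop := out = counter_common_sublists_duplicates_alt L c Current
instance (L : List (List Int)) (c : Int) (Current : List Int) (out : Int) : Decidable (Spec_counter_common_sublists_duplicates L c Current out) := by unfold Spec_counter_common_sublists_duplicates; infer_instance

-- ===== CLAIM (what is proved, stated in full; the proofs are below) =====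
def Claim_equal_counter_common_sublists_duplicates : Prop := ∀ (L : List (List Int)) (c : Int) (Current : List Int), Dom_counter_common_sublists_duplicates L c Current → Spec_counter_common_sublists_duplicates L c Current (counter_common_sublists_duplicates L c Current)

-- ===== LEMMAS AND PROOFS =====

-- the multiset overlap of lst and Current, as a Finset sum (both inner loops compute it)
def pvOverlap (Current lst : List Int) : Int :=
  ∑ e ∈ lst.toFinset, min ((List.count e lst : Int)) ((List.count e Current : Int))

-- A's inner loop computes pvOverlap
lemma innerA_eq (Current lst : List Int) : pvCommonA Current lst = pvOverlap Current lst := by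
  unfold pvCommonA
  rw [PySem.List.foldl_add, zero_add,
    ← List.sum_toFinset _ (PySem.Set.nodup_ofList lst)]
  have hset : (PySem.Set.ofList lst).toFinset = lst.toFinset := by
    ext x; simp [PySem.Set.mem_ofList]
  rw [hset, pvOverlap]
  refine Finset.sum_congr rfl fun e _ => ?_
  simp [PySem.List.count, Nat.cast_min]

-- B's streaming loop over cur, started from any nonnegative bag d and counter k,
-- adds the overlap of the bag with cur
lemma stream_eq (cur : List Int) (d : PySem.Dict Int Int) (k : Int)
    (hd : ∀ e, 0 ≤ d.getD e 0) :
    (pvStream cur (d, k)).2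
    = k + ∑ e ∈ cur.toFinset, min (d.getD e 0) ((List.count e cur : Int)) := by
  induction cur generalizing d k with
  | nil => simp [pvStream]
  | cons e rest ih =>
    rw [show pvStream (e :: rest) (d, k)
      = pvStream rest (if d.getD e 0 > 0 then (d.insert e (d.getD e 0 - 1), k + 1) else (d, k))
      from rfl]
    by_cases h : d.getD e 0 > 0
    · rw [if_pos h]
      rw [ih _ _ (by
        intro e'
        rw [PySem.Dict.getD_insert]
        split_ifs with he'
        · omega
        · exact hd e')]
      by_cases he : e ∈ rest.toFinset
      · have hins : (e :: rest).toFinset = rest.toFinset := by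
          simp [List.toFinset_cons, Finset.insert_eq_self.mpr he]
        rw [hins]
        rw [← Finset.add_sum_erase _ _ he, ← Finset.add_sum_erase _ _ he]
        have hterm : min ((d.insert e (d.getD e 0 - 1)).getD e 0) ((List.count e rest : Int))
            = min (d.getD e 0) ((List.count e (e :: rest) : Int)) - 1 := by
          rw [PySem.Dict.getD_insert, if_pos rfl, List.count_cons_self]
          push_cast; omega
        have hrest : ∑ x ∈ rest.toFinset.erase e,
              min ((d.insert e (d.getD e 0 - 1)).getD x 0) ((List.count x rest : Int))
            = ∑ x ∈ rest.toFinset.erase e,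
              min (d.getD x 0) ((List.count x (e :: rest) : Int)) := by
          refine Finset.sum_congr rfl fun x hx => ?_
          have hxe : x ≠ e := Finset.ne_of_mem_erase hx
          rw [PySem.Dict.getD_insert, if_neg hxe]
          simp [Ne.symm hxe]
        rw [hterm, hrest]; ring
      · have hins : (e :: rest).toFinset = insert e rest.toFinset := List.toFinset_cons
        rw [hins, Finset.sum_insert he]
        have hterm : min (d.getD e 0) ((List.count e (e :: rest) : Int)) = 1 := by
          have h0 : List.count e rest = 0 := by
            rw [List.count_eq_zero]; simpa using he
          rw [List.count_cons_self, h0]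
          push_cast; omega
        have hrest : ∑ x ∈ rest.toFinset,
              min ((d.insert e (d.getD e 0 - 1)).getD x 0) ((List.count x rest : Int))
            = ∑ x ∈ rest.toFinset,
              min (d.getD x 0) ((List.count x (e :: rest) : Int)) := by
          refine Finset.sum_congr rfl fun x hx => ?_
          have hxe : x ≠ e := by rintro rfl; exact he hx
          rw [PySem.Dict.getD_insert, if_neg hxe]
          simp [Ne.symm hxe]
        rw [hterm, hrest]; ring
    · rw [if_neg h]
      rw [ih _ _ hd]
      have hde : d.getD e 0 = 0 := le_antisymm (by omega) (hd e)
      by_cases he : e ∈ rest.toFinset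
      · have hins : (e :: rest).toFinset = rest.toFinset := by
          simp [List.toFinset_cons, Finset.insert_eq_self.mpr he]
        rw [hins]
        refine congrArg (k + ·) (Finset.sum_congr rfl fun x hx => ?_)
        by_cases hxe : x = e
        · subst hxe
          rw [hde, List.count_cons_self]
          have : (0:Int) ≤ (List.count x rest : Int) := by positivity
          push_cast; omega
        · simp [Ne.symm hxe]
      · have hins : (e :: rest).toFinset = insert e rest.toFinset := List.toFinset_cons
        rw [hins, Finset.sum_insert he]
        have hterm : min (d.getD e 0) ((List.count e (e :: rest) : Int)) = 0 := by
          rw [hde]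
          have : (0:Int) ≤ (List.count e (e :: rest) : Int) := by positivity
          omega
        have hrest : ∑ x ∈ rest.toFinset,
              min (d.getD x 0) ((List.count x rest : Int))
            = ∑ x ∈ rest.toFinset,
              min (d.getD x 0) ((List.count x (e :: rest) : Int)) := by
          refine Finset.sum_congr rfl fun x hx => ?_
          have hxe : x ≠ e := by rintro rfl; exact he hx
          simp [Ne.symm hxe]
        rw [hterm, hrest]; ring

-- B's inner computation (bag build + streaming pass) computes pvOverlap
lemma innerB_eq (Current lst : List Int) :
    (pvStream Current (pvBag lst, 0)).2 = pvOverlap Current lst := by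
  have hbag : pvBag lst = PySem.Dict.counter lst :=
    PySem.Dict.foldl_insert_getD_add_one_eq_counter lst
  rw [hbag, stream_eq Current _ 0 (fun e => by rw [PySem.Dict.getD_counter]; positivity),
    zero_add, pvOverlap]
  have hB : ∑ e ∈ Current.toFinset,
        min ((PySem.Dict.counter lst).getD e 0) ((List.count e Current : Int))
      = ∑ e ∈ Current.toFinset, min ((List.count e lst : Int)) ((List.count e Current : Int)) :=
    Finset.sum_congr rfl fun e _ => by rw [PySem.Dict.getD_counter]
  have hA : ∑ e ∈ lst.toFinset, min ((List.count e lst : Int)) ((List.count e Current : Int))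
      = ∑ e ∈ lst.toFinset ∪ Current.toFinset,
          min ((List.count e lst : Int)) ((List.count e Current : Int)) := by
    refine Finset.sum_subset Finset.subset_union_left fun x _ hx => ?_
    have h1 : List.count x lst = 0 := by
      rw [List.count_eq_zero]; intro hmem; exact hx (List.mem_toFinset.mpr hmem)
    rw [h1]
    have : (0:Int) ≤ (List.count x Current : Int) := by positivity
    push_cast; omega
  have hB2 : ∑ e ∈ Current.toFinset, min ((List.count e lst : Int)) ((List.count e Current : Int))
      = ∑ e ∈ lst.toFinset ∪ Current.toFinset,
          min ((List.count e lst : Int)) ((List.count e Current : Int)) := by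
    refine Finset.sum_subset Finset.subset_union_right fun x _ hx => ?_
    have h2 : List.count x Current = 0 := by
      rw [List.count_eq_zero]; intro hmem; exact hx (List.mem_toFinset.mpr hmem)
    rw [h2]
    have : (0:Int) ≤ (List.count x lst : Int) := by positivity
    push_cast; omega
  rw [hB, hB2, hA]

-- A's outer fold: start value minus the number of matching sublists
lemma foldA_eq (L : List (List Int)) (c : Int) (Current : List Int) (acc : Int) :
    L.foldl (fun counter lst =>
      if c == pvCommonA Current lst then counter - 1 else counter) acc
    = acc - (L.countP (fun lst => pvOverlap Current lst == c) : Int) := by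
  induction L generalizing acc with
  | nil => simp
  | cons lst rest ih =>
    simp only [List.foldl_cons]
    rw [innerA_eq]
    by_cases h : pvOverlap Current lst = c
    · rw [if_pos (by simp [h]), ih, List.countP_cons, if_pos (by simp [h])]
      push_cast; ring
    · rw [if_neg (by simp only [beq_iff_eq]; omega), ih, List.countP_cons,
        if_neg (by simp only [beq_iff_eq]; exact h)]
      push_cast; ring

-- B's outer fold: start value plus the number of non-matching sublists
lemma foldB_eq (L : List (List Int)) (c : Int) (Current : List Int) (tot : Int) :
    L.foldl (fun total lst =>
      if (pvStream Current (pvBag lst, 0)).2 != c then total + 1 else total) tot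
    = tot + ((L.length : Int) - (L.countP (fun lst => pvOverlap Current lst == c) : Int)) := by
  induction L generalizing tot with
  | nil => simp
  | cons lst rest ih =>
    simp only [List.foldl_cons, List.length_cons]
    rw [innerB_eq]
    by_cases h : pvOverlap Current lst = c
    · rw [if_neg (by simp [h]), ih, List.countP_cons, if_pos (by simp [h])]
      push_cast; ring
    · rw [if_pos (by simp only [bne_iff_ne, ne_eq]; exact h), ih, List.countP_cons,
        if_neg (by simp only [beq_iff_eq]; exact h)]
      push_cast; ring

-- ===== VERDICT (by name: the statement is the Claim_ definition above) =====
theorem counter_common_sublists_duplicates_spec : Claim_equal_counter_common_sublists_duplicates := by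
  intro L c Current _
  unfold Spec_counter_common_sublists_duplicates
  unfold counter_common_sublists_duplicates counter_common_sublists_duplicates_alt
  rw [foldA_eq, foldB_eq]
  ring
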